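-- pv_equiv track=rewrite | github.com/MrBrantCode/unitest_baseline | mut_generate/mist_train_cf/cf_21045/solution.py | greet
-- ===== SOURCE A (Python) =====
-- def greet(name):
--     """
--     Checks if a given name is valid and returns a greeting if valid, otherwise returns an error message.
--
--     A valid name consists of alphabets only, is case-insensitive, does not contain consecutive whitespace characters,
--     and only contains ASCII characters.
--
--     :param name: The input name to be checked.
--     :return: A greeting message if the name is valid, otherwise an error message.
--     """
--     if not name:
--         return "Invalid name!"
--     elif any(char.isdigit() or not char.isascii() for char in name):
--         return "Invalid name!"
--     elif any(char.isspace() for char in name) and any(name[i].isspace() and name[i+1].isspace() for i in range(len(name)-1)):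
--         return "Invalid name!"
--     else:
--         trimmed_name = name.strip()
--         return f"Hello, {trimmed_name}!"
-- ===== SOURCE B (Python) =====
-- def greet(name):
--     """Single-pass validation: one walk over the characters with a previous-was-whitespace flag."""
--     if not name:
--         return "Invalid name!"
--     prev_ws = False
--     for ch in name:
--         if ch.isdigit() or not ch.isascii():
--             return "Invalid name!"
--         if ch.isspace():
--             if prev_ws:
--                 return "Invalid name!"
--             prev_ws = True
--         else:
--             prev_ws = False
--     return f"Hello, {name.strip()}!"
-- ===== Notes on version B (the rewrite author's own statement) =====
-- stated objective: simpler
-- what changed: Replaces A's three separate any()-scans (digit/non-ascii scan, whitespace-existence scan, indexed consecutive-whitespace scan) with one linear walk carrying a previous-was-whitespace flag that returns early on the first offending character.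
import Mathlib
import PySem

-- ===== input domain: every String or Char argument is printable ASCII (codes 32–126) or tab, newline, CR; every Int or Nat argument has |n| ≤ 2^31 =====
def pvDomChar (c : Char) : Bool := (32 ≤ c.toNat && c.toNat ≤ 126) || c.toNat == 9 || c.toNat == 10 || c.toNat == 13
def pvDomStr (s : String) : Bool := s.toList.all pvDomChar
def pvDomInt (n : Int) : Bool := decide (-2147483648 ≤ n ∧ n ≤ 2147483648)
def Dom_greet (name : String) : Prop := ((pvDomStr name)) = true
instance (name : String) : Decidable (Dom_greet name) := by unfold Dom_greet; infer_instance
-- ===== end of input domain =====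

-- B = one linear pass with a previous-was-whitespace flag instead of A's three separate scans (simpler decomposition).

-- ===== PORT A =====
-- char.isdigit() or not char.isascii()  (isascii ↔ code point < 128)
def pvBadChar (c : Char) : Bool := PySem.Chars.isdigit c || !(c.toNat ≤ 127)

def greet (name : String) : String :=
  let cs := name.toList
  if cs.isEmpty then "Invalid name!"
  else if cs.any pvBadChar then "Invalid name!"
  else if cs.any PySem.Chars.isspace &&
          -- any(name[i].isspace() and name[i+1].isspace() for i in range(len(name)-1));
          -- both indices are always in range, so getD with a dummy default is exact here
          (List.range (cs.length - 1)).any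
            (fun i => PySem.Chars.isspace (cs.getD i ' ') && PySem.Chars.isspace (cs.getD (i+1) ' ')) then
    "Invalid name!"
  else "Hello, " ++ PySem.Str.strip name ++ "!"

-- ===== PORT B =====
-- the for-loop of Source B: returns false as soon as a bad char or a whitespace-after-whitespace is seen
def pvGreetOk : List Char → Bool → Bool
  | [], _ => true
  | c :: rest, prevWs =>
    if pvBadChar c then false
    else if PySem.Chars.isspace c then
      if prevWs then false else pvGreetOk rest true
    else pvGreetOk rest false

def greet_alt (name : String) : String :=
  if name.toList.isEmpty then "Invalid name!"
  else if pvGreetOk name.toList false then "Hello, " ++ PySem.Str.strip name ++ "!"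
  else "Invalid name!"

-- ===== PRECONDITION & SPEC =====
def Spec_greet (name : String) (out : String) : Prop := out = greet_alt name
instance (name : String) (out : String) : Decidable (Spec_greet name out) := by unfold Spec_greet; infer_instance

-- ===== CLAIM (what is proved, stated in full; the proofs are below) =====
def Claim_equal_greet : Prop := ∀ (name : String), Dom_greet name → Spec_greet name (greet name)

-- ===== LEMMAS AND PROOFS =====

-- recursive form of A's indexed consecutive-whitespace scan
def pvPairWs : List Char → Bool
  | a :: b :: rest => (PySem.Chars.isspace a && PySem.Chars.isspace b) || pvPairWs (b :: rest)
  | _ => false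

lemma pvRange_eq_pair (cs : List Char) :
    (List.range (cs.length - 1)).any
      (fun i => PySem.Chars.isspace (cs.getD i ' ') && PySem.Chars.isspace (cs.getD (i+1) ' '))
      = pvPairWs cs := by
  induction cs with
  | nil => simp [pvPairWs]
  | cons a rest ih =>
    cases rest with
    | nil => simp [pvPairWs]
    | cons b rest' =>
      have : (a :: b :: rest').length - 1 = (b :: rest').length - 1 + 1 := by
        simp [List.length]
      rw [this, List.range_succ_eq_map]
      simp only [List.any_cons, List.any_map] at *
      simp only [List.getD_cons_zero, List.getD_cons_succ, pvPairWs]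
      rw [← ih]
      rfl

lemma pvPairWs_imp_any (cs : List Char) (h : pvPairWs cs = true) :
    cs.any PySem.Chars.isspace = true := by
  induction cs with
  | nil => simp [pvPairWs] at h
  | cons a rest ih =>
    cases rest with
    | nil => simp [pvPairWs] at h
    | cons b rest' =>
      simp only [pvPairWs, Bool.or_eq_true, Bool.and_eq_true] at h
      rcases h with ⟨ha, _⟩ | h
      · simp [ha]
      · simp only [List.any_cons, Bool.or_eq_true]
        exact Or.inr (by simpa using ih h)

def pvHeadWs : List Char → Bool
  | [] => false
  | c :: _ => PySem.Chars.isspace c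

lemma pvGreetOk_char (cs : List Char) (prev : Bool) :
    pvGreetOk cs prev = (!cs.any pvBadChar && !pvPairWs cs && !(prev && pvHeadWs cs)) := by
  induction cs generalizing prev with
  | nil => simp [pvGreetOk, pvPairWs, pvHeadWs]
  | cons a rest ih =>
    simp only [pvGreetOk, List.any_cons, pvHeadWs]
    by_cases hb : pvBadChar a
    · simp [hb]
    · by_cases hs : PySem.Chars.isspace a
      · cases prev with
        | true => simp [hb, hs]
        | false =>
          rw [if_neg (by simp [hb]), if_pos hs, if_neg (by simp), ih]
          cases rest with
          | nil => simp [pvPairWs, pvHeadWs, hb]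
          | cons b rest' =>
            simp only [pvPairWs, pvHeadWs, hs, List.any_cons]
            simp [hb]
            cases pvBadChar b <;> cases rest'.any pvBadChar <;>
              cases PySem.Chars.isspace b <;> cases pvPairWs (b :: rest') <;> simp
      · rw [if_neg (by simp [hb]), if_neg (by simp [hs]), ih]
        cases rest with
        | nil => simp [pvPairWs, pvHeadWs, hb, hs]
        | cons b rest' => simp [pvPairWs, pvHeadWs, hs, hb]

-- ===== VERDICT (by name: the statement is the Claim_ definition above) =====
theorem greet_spec : Claim_equal_greet := by
  intro name _
  unfold Spec_greet greet greet_alt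
  simp only []
  by_cases hemp : name.toList.isEmpty
  · simp [hemp]
  · rw [if_neg hemp, if_neg hemp, pvGreetOk_char]
    by_cases hbad : name.toList.any pvBadChar
    · simp [hbad]
    · rw [if_neg hbad]
      rw [pvRange_eq_pair]
      by_cases hp : pvPairWs name.toList
      · simp [hp, hbad, pvPairWs_imp_any _ hp]
      · simp [hp, hbad]
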